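-- pv_equiv track=rewrite | github.com/sweethr100/CodeBraker | main.py | brakecode
-- ===== SOURCE A (Python) =====
-- def brakecode(user_code):
--     output=""
--     for i in user_code:
--         if i == "m":
--             output+="rn"
--         elif i == "l":
--             output+="I"
--         else:
--             output+=i
--     return output
-- ===== SOURCE B (Python) =====
-- def brakecode(user_code):
--     return user_code.replace("m", "rn").replace("l", "I")
-- ===== Notes on version B (the rewrite author's own statement) =====
-- stated objective: faster
-- what changed: Replaces the character-by-character accumulating loop with two chained str.replace passes (m->rn then l->I); safe because neither replacement output contains a character the other pass rewrites.
import Mathlib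
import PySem

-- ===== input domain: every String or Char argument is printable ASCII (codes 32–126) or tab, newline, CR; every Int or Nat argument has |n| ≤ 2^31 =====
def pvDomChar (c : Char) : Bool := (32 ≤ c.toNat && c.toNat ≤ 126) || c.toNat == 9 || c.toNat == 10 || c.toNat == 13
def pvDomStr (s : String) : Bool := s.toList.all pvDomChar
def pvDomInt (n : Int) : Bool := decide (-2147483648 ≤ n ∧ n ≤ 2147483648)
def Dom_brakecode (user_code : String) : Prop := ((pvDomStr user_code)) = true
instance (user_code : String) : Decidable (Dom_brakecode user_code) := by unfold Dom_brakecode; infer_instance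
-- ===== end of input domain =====

-- B replaces A's single character-by-character accumulating loop with two chained str.replace passes (idiomatic).

-- ===== PORT A =====
-- A: one pass over the characters, appending "rn" for 'm', "I" for 'l', the character itself otherwise.
def brakecode (user_code : String) : String :=
  String.ofList (user_code.toList.foldl
    (fun output i =>
      output ++ (if i = 'm' then ['r', 'n'] else if i = 'l' then ['I'] else [i])) [])

-- ===== PORT B =====
def brakecode_alt (user_code : String) : String :=
  PySem.Str.replace (PySem.Str.replace user_code "m" "rn") "l" "I"

-- ===== PRECONDITION & SPEC =====
def Spec_brakecode (user_code : String) (out : String) : Prop := out = brakecode_alt user_code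
instance (user_code : String) (out : String) : Decidable (Spec_brakecode user_code out) := by unfold Spec_brakecode; infer_instance

-- ===== CLAIM (what is proved, stated in full; the proofs are below) =====
def Claim_equal_brakecode : Prop := ∀ (user_code : String), Dom_brakecode user_code → Spec_brakecode user_code (brakecode user_code)

-- ===== LEMMAS AND PROOFS =====

theorem go_single (c : Char) (new : List Char) :
    ∀ (fuel : Nat) (l acc : List Char), l.length ≤ fuel →
      PySem.Chars.replace.go [c] new fuel l acc
        = acc.reverse ++ l.flatMap (fun x => if x = c then new else [x]) := by
  intro fuel
  induction fuel with
  | zero =>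
    intro l acc h
    have : l = [] := List.eq_nil_of_length_eq_zero (Nat.le_zero.mp h)
    subst this
    simp [PySem.Chars.replace.go]
  | succ n ih =>
    intro l acc h
    cases l with
    | nil => simp [PySem.Chars.replace.go]
    | cons x t =>
      simp only [PySem.Chars.replace.go]
      by_cases hx : x = c
      · subst hx
        simp only [List.isPrefixOf, BEq.rfl, Bool.true_and, if_true]
        rw [ih]
        · simp
        · simpa using Nat.le_of_succ_le_succ h
      · have : ([c].isPrefixOf (x :: t)) = false := by
          simp [List.isPrefixOf]
          exact fun hc => absurd hc.symm hx
        rw [this]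
        simp only [Bool.false_eq_true, if_false]
        rw [ih t (x :: acc) (by simpa using Nat.le_of_succ_le_succ h)]
        simp [hx]

theorem replace_single (c : Char) (new s : List Char) :
    PySem.Chars.replace s [c] new = s.flatMap (fun x => if x = c then new else [x]) := by
  simp only [PySem.Chars.replace, List.isEmpty_cons, Bool.false_eq_true, if_false]
  rw [go_single c new s.length s [] le_rfl]
  simp

theorem brakecode_spec : Claim_equal_brakecode := by
  intro u _
  unfold Spec_brakecode brakecode brakecode_alt PySem.Str.replace
  rw [PySem.List.foldl_append_eq_flatMap]
  simp only [String.toList_ofList]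
  have h1 : ("m" : String).toList = ['m'] := rfl
  have h2 : ("rn" : String).toList = ['r', 'n'] := rfl
  have h3 : ("l" : String).toList = ['l'] := rfl
  have h4 : ("I" : String).toList = ['I'] := rfl
  rw [h1, h2, h3, h4, replace_single, replace_single, List.flatMap_assoc]
  simp only [List.nil_append]
  congr 1
  apply List.flatMap_congr
  intro x _
  by_cases hm : x = 'm'
  · subst hm; decide
  · by_cases hl : x = 'l'
    · subst hl; decide
    · simp [hm, hl]
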